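-- pv_equiv track=rewrite | github.com/nastyh/LeetCode | Basic Data Structures/2425_bitwise_xor_of_all_pairings.py | xorAllNums_optimized
-- ===== SOURCE A (Python) =====
-- from typing import List
--
-- def xorAllNums_optimized(nums1: List[int], nums2: List[int]) -> int:
--     """
--     O(n + m), where lenghts of nums1 and nums2
--     O(1)
--     a xor a = 0
--     a xor a = a
--     xor is also commutative and associative, so we can xor inside nums1, inside nums2
--     and then the results
--
--     if nums2 has an even number of elements, XORing nums1 with every element in num2
--     will result in 0 b/c
--     x ^ x ^ y ^ y.. = 0 where every element in nums2 cancels out when XORed an even num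
--     of times
--     Same: if nums2 has an even number of elements, XORing all pairs involving nums2 also results in 0
--     The result depends only on the XOR of all elements in nums1 and nums2 if both arrays have odd lengths.
--     If either array has an even length, the result is 0
--     """
--     xor1 = 0
--     xor2 = 0
--     # xor everything in nums1
--     for num in nums1:
--         xor1 ^= num
--     # xor everything in nums2
--     for num in nums2:
--         xor2 ^= num
--     if len(nums1) % 2 == 1 and len(nums2) % 2 == 1:
--         return xor1 ^ xor2
--     elif len(nums1) % 2 == 1:
--         return xor2
--     elif len(nums2) % 2 == 1:
--         return xor1
--     else:
--         return 0
-- ===== SOURCE B (Python) =====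
-- from typing import List
--
-- def xorAllNums_optimized(nums1: List[int], nums2: List[int]) -> int:
--     # Direct definition: XOR every pairing literally.
--     res = 0
--     for a in nums1:
--         for b in nums2:
--             res ^= a ^ b
--     return res
-- ===== Notes on version B (the rewrite author's own statement) =====
-- stated objective: alternative
-- what changed: B computes the XOR of all pairings by the literal double loop over every (a,b) pair, instead of A's parity shortcut with per-array XOR accumulators and length-parity branches.
import Mathlib
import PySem

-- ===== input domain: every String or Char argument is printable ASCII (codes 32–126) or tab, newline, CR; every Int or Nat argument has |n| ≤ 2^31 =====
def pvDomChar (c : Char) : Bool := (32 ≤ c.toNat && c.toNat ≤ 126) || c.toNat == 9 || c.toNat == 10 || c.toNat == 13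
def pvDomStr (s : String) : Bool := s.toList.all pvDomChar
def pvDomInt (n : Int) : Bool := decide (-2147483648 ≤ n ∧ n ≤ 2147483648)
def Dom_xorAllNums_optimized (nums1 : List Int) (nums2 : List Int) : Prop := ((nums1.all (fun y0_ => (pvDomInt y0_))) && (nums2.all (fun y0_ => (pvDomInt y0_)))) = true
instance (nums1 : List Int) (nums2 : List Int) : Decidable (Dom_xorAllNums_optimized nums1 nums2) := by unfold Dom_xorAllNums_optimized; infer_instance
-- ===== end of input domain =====

-- B replaces A's parity shortcut by the literal double loop over all pairings (alternative decomposition).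

-- ===== PORT A =====
def xorAllNums_optimized (nums1 : List Int) (nums2 : List Int) : Int :=
  let xor1 := nums1.foldl (fun acc num => PySem.Int.bxor acc num) 0
  let xor2 := nums2.foldl (fun acc num => PySem.Int.bxor acc num) 0
  if PySem.Int.mod (nums1.length : Int) 2 = 1 ∧ PySem.Int.mod (nums2.length : Int) 2 = 1 then
    PySem.Int.bxor xor1 xor2
  else if PySem.Int.mod (nums1.length : Int) 2 = 1 then
    xor2
  else if PySem.Int.mod (nums2.length : Int) 2 = 1 then
    xor1
  else
    0

-- ===== PORT B =====
def xorAllNums_optimized_alt (nums1 : List Int) (nums2 : List Int) : Int :=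
  nums1.foldl (fun res a =>
    nums2.foldl (fun res b => PySem.Int.bxor res (PySem.Int.bxor a b)) res) 0

-- ===== PRECONDITION & SPEC =====
def Spec_xorAllNums_optimized (nums1 : List Int) (nums2 : List Int) (out : Int) : Prop := out = xorAllNums_optimized_alt nums1 nums2
instance (nums1 : List Int) (nums2 : List Int) (out : Int) : Decidable (Spec_xorAllNums_optimized nums1 nums2 out) := by unfold Spec_xorAllNums_optimized; infer_instance

-- ===== CLAIM (what is proved, stated in full; the proofs are below) =====
def Claim_equal_xorAllNums_optimized : Prop := ∀ (nums1 : List Int) (nums2 : List Int), Dom_xorAllNums_optimized nums1 nums2 → Spec_xorAllNums_optimized nums1 nums2 (xorAllNums_optimized nums1 nums2)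

-- ===== LEMMAS AND PROOFS =====

theorem bxor_eq_xor (a b : Int) : PySem.Int.bxor a b = Int.xor a b := by
  cases a with
  | ofNat m => cases b with
    | ofNat n => simp [PySem.Int.bxor, Int.xor]
    | negSucc n => simp [PySem.Int.bxor, Int.xor, Int.negSucc_eq]; omega
  | negSucc m => cases b with
    | ofNat n => simp [PySem.Int.bxor, Int.xor, Int.negSucc_eq]; omega
    | negSucc n => simp [PySem.Int.bxor, Int.xor, Int.negSucc_eq]; omega

theorem bxor_assoc (a b c : Int) :
    PySem.Int.bxor (PySem.Int.bxor a b) c = PySem.Int.bxor a (PySem.Int.bxor b c) := by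
  simp only [bxor_eq_xor]
  cases a <;> cases b <;> cases c <;> simp [Int.xor, Nat.xor_assoc]

theorem bxor_left_comm (a b c : Int) :
    PySem.Int.bxor a (PySem.Int.bxor b c) = PySem.Int.bxor b (PySem.Int.bxor a c) := by
  rw [← bxor_assoc, PySem.Int.bxor_comm a b, bxor_assoc]

theorem zero_bxor (a : Int) : PySem.Int.bxor 0 a = a := by
  rw [PySem.Int.bxor_comm]; exact PySem.Int.bxor_zero a

theorem bxor_cancel_left (a b : Int) : PySem.Int.bxor a (PySem.Int.bxor a b) = b := by
  rw [← bxor_assoc, PySem.Int.bxor_self, zero_bxor]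

-- pull the accumulator out of the plain xor fold
theorem foldl_bxor_acc (l : List Int) (r : Int) :
    l.foldl (fun acc num => PySem.Int.bxor acc num) r
      = PySem.Int.bxor r (l.foldl (fun acc num => PySem.Int.bxor acc num) 0) := by
  induction l generalizing r with
  | nil => simp
  | cons b t ih =>
    simp only [List.foldl_cons]
    rw [ih (PySem.Int.bxor r b), ih (PySem.Int.bxor 0 b), zero_bxor, bxor_assoc]

-- the inner loop of B: fold of res ^= a ^ b over l
theorem inner_loop (a : Int) (l : List Int) (r : Int) :
    l.foldl (fun res b => PySem.Int.bxor res (PySem.Int.bxor a b)) r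
      = PySem.Int.bxor r (PySem.Int.bxor (if l.length % 2 = 1 then a else 0)
          (l.foldl (fun acc num => PySem.Int.bxor acc num) 0)) := by
  induction l generalizing r with
  | nil => simp
  | cons b t ih =>
    simp only [List.foldl_cons, List.length_cons]
    rw [ih, foldl_bxor_acc t (PySem.Int.bxor 0 b), zero_bxor]
    by_cases h1 : t.length % 2 = 1
    · have h2 : (t.length + 1) % 2 ≠ 1 := by omega
      simp only [if_pos h1, if_neg h2]
      simp [bxor_left_comm, PySem.Int.bxor_comm, bxor_cancel_left, zero_bxor]
    · have h2 : (t.length + 1) % 2 = 1 := by omega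
      simp only [if_neg h1, if_pos h2]
      simp [bxor_left_comm, PySem.Int.bxor_comm, zero_bxor]

-- the outer loop of B
theorem outer_loop (l nums2 : List Int) (r : Int) :
    l.foldl (fun res a =>
        nums2.foldl (fun res b => PySem.Int.bxor res (PySem.Int.bxor a b)) res) r
      = PySem.Int.bxor r (PySem.Int.bxor
          (if nums2.length % 2 = 1 then l.foldl (fun acc num => PySem.Int.bxor acc num) 0 else 0)
          (if l.length % 2 = 1 then nums2.foldl (fun acc num => PySem.Int.bxor acc num) 0 else 0)) := by
  induction l generalizing r with
  | nil => simp
  | cons a t ih =>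
    simp only [List.foldl_cons, List.length_cons]
    rw [inner_loop, ih, foldl_bxor_acc t (PySem.Int.bxor 0 a), zero_bxor]
    by_cases h1 : t.length % 2 = 1
    · have h2 : (t.length + 1) % 2 ≠ 1 := by omega
      simp only [if_pos h1, if_neg h2]
      by_cases hn : nums2.length % 2 = 1 <;>
        simp [hn, bxor_left_comm, PySem.Int.bxor_comm, bxor_cancel_left, zero_bxor]
    · have h2 : (t.length + 1) % 2 = 1 := by omega
      simp only [if_neg h1, if_pos h2]
      by_cases hn : nums2.length % 2 = 1 <;>
        simp [hn, bxor_left_comm, PySem.Int.bxor_comm, bxor_cancel_left, zero_bxor]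

theorem mod_len_iff (l : List Int) : PySem.Int.mod (l.length : Int) 2 = 1 ↔ l.length % 2 = 1 := by
  have := PySem.Int.mod_natCast l.length 2
  rw [show ((2 : Nat) : Int) = (2 : Int) by norm_num] at this
  rw [this]
  omega

-- ===== VERDICT (by name: the statement is the Claim_ definition above) =====
theorem xorAllNums_optimized_spec : Claim_equal_xorAllNums_optimized := by
  intro nums1 nums2 _
  unfold Spec_xorAllNums_optimized xorAllNums_optimized xorAllNums_optimized_alt
  rw [outer_loop, zero_bxor]
  simp only [mod_len_iff]
  by_cases h1 : nums1.length % 2 = 1 <;> by_cases h2 : nums2.length % 2 = 1 <;>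
    simp [h1, h2, PySem.Int.bxor_comm, zero_bxor]
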